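-- pv_equiv track=rewrite | github.com/PetarMihailov/Softuni_Python | Fundamentals/Lists_Advanced/More_Exercise/take_skip_rope.py | take_skip_rope
-- ===== SOURCE A (Python) =====
-- def take_skip_rope(message):
--     # Split the string into numbers and non-numbers
--     numbers = [int(ch) for ch in message if ch.isdigit()]
--     non_numbers = [ch for ch in message if not ch.isdigit()]
--
--     # Separate the numbers into take and skip lists
--     take_list = numbers[::2]
--     skip_list = numbers[1::2]
--
--     # Iterate over take and skip lists to build the result
--     result = []
--     index = 0
--
--     for take, skip in zip(take_list, skip_list):
--         # Take 'take' characters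
--         result.extend(non_numbers[index:index + take])
--         # Update the index to skip 'skip' characters
--         index += take + skip
--
--     return ''.join(result)
-- ===== SOURCE B (Python) =====
-- def take_skip_rope(message):
--     # One classification pass, then consume a letter iterator pairwise over a digit iterator.
--     digits = []
--     letters = []
--     for ch in message:
--         if ch.isdigit():
--             digits.append(int(ch))
--         else:
--             letters.append(ch)
--
--     out = []
--     it = iter(letters)
--     dig = iter(digits)
--     while True:
--         take = next(dig, None)
--         skip = next(dig, None)
--         if skip is None:  # no digits left, or a trailing unpaired digit: done
--             break
--         for _ in range(take):
--             ch = next(it, None)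
--             if ch is None:
--                 break
--             out.append(ch)
--         for _ in range(skip):
--             next(it, None)
--     return ''.join(out)
-- ===== Notes on version B (the rewrite author's own statement) =====
-- stated objective: alternative
-- what changed: Replaces the two comprehensions, the two strided slices, the zip and the running index with a single classification pass and one consumable iterator over the letters that a pairwise digit iterator drives (pull `take` letters, discard `skip`), so no index arithmetic or precomputed take/skip lists exist.
import Mathlib
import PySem

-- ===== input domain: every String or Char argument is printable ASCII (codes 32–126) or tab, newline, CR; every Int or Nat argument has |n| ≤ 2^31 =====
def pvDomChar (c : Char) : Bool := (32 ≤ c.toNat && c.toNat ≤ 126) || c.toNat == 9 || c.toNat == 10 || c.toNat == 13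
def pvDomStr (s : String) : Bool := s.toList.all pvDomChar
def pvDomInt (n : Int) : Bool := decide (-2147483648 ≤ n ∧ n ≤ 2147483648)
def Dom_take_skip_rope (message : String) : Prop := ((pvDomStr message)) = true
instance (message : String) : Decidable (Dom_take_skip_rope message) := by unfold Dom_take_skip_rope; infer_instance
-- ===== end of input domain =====

-- B replaces A's strided take/skip slices, zip and running index by one classification
-- pass and a consumable letter iterator driven pairwise by a digit iterator (alternative
-- decomposition, same O(n) cost).

-- ===== PORT A =====
-- int(ch) for a single character guarded by ch.isdigit() is its code point minus 48
-- (exact there; Nat subtraction is exact since a digit's code point is ≥ 48).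
def take_skip_rope (message : String) : String :=
  let numbers : List Int :=
    (message.toList.filter (fun ch => PySem.Chars.isdigit ch)).map
      (fun ch => ((ch.toNat - 48 : Nat) : Int))
  let non_numbers : List Char := message.toList.filter (fun ch => !(PySem.Chars.isdigit ch))
  let take_list : List Int := (PySem.List.slice? numbers none none 2).getD []      -- numbers[::2]; step 2 ≠ 0 never fails
  let skip_list : List Int := (PySem.List.slice? numbers (some 1) none 2).getD []  -- numbers[1::2]
  let p := (take_list.zip skip_list).foldl
    (fun (st : List Char × Int) ts =>
      (st.1 ++ PySem.List.slice non_numbers (some st.2) (some (st.2 + ts.1)),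
       st.2 + ts.1 + ts.2))
    ([], 0)
  String.ofList p.1   -- ''.join of a list of characters

-- ===== PORT B =====
-- 'for _ in range(take): ch = next(it, None); if ch is None: break; out.append(ch)'
-- — the iterator is the list of not-yet-consumed letters, next = pop the head.
def pvTakeLoop : Nat → List Char → List Char × List Char
  | 0, it => ([], it)
  | _ + 1, [] => ([], [])
  | n + 1, c :: it => let r := pvTakeLoop n it; (c :: r.1, r.2)

-- 'for _ in range(skip): next(it, None)'
def pvSkipLoop : Nat → List Char → List Char
  | 0, it => it
  | _ + 1, [] => []
  | n + 1, _ :: it => pvSkipLoop n it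

-- 'while True: take = next(dig, None); skip = next(dig, None); if skip is None: break; …'
def pvPairLoop : List Int → List Char → List Char → List Char
  | t :: s :: rest, it, out =>
      let r := pvTakeLoop t.toNat it
      pvPairLoop rest (pvSkipLoop s.toNat r.2) (out ++ r.1)
  | _, _, out => out

def take_skip_rope_alt (message : String) : String :=
  let p := message.toList.foldl
    (fun (dl : List Int × List Char) ch =>
      if PySem.Chars.isdigit ch then (dl.1 ++ [((ch.toNat - 48 : Nat) : Int)], dl.2)
      else (dl.1, dl.2 ++ [ch]))
    ([], [])
  String.ofList (pvPairLoop p.1 p.2 [])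

-- ===== PRECONDITION & SPEC =====
def Spec_take_skip_rope (message : String) (out : String) : Prop := out = take_skip_rope_alt message
instance (message : String) (out : String) : Decidable (Spec_take_skip_rope message out) := by unfold Spec_take_skip_rope; infer_instance

-- ===== CLAIM (what is proved, stated in full; the proofs are below) =====
def Claim_equal_take_skip_rope : Prop := ∀ (message : String), Dom_take_skip_rope message → Spec_take_skip_rope message (take_skip_rope message)

-- ===== LEMMAS AND PROOFS =====

-- B's classification fold equals A's two filters.
theorem pvClassify_eq (l : List Char) (ds : List Int) (ls : List Char) :
    l.foldl (fun (dl : List Int × List Char) ch =>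
      if PySem.Chars.isdigit ch then (dl.1 ++ [((ch.toNat - 48 : Nat) : Int)], dl.2)
      else (dl.1, dl.2 ++ [ch])) (ds, ls)
    = (ds ++ (l.filter (fun ch => PySem.Chars.isdigit ch)).map (fun ch => ((ch.toNat - 48 : Nat) : Int)),
       ls ++ l.filter (fun ch => !(PySem.Chars.isdigit ch))) := by
  induction l generalizing ds ls with
  | nil => simp
  | cons c t ih =>
    by_cases h : PySem.Chars.isdigit c = true <;> simp [h, ih]

-- A's zipped pair list (numbers[::2] zipped with numbers[1::2]), as one definition.
def pvApairs (ns : List Int) : List (Int × Int) :=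
  ((PySem.List.slice? ns none none 2).getD []).zip ((PySem.List.slice? ns (some 1) none 2).getD [])

theorem pvApairs_nil : pvApairs [] = [] := by decide

theorem pvApairs_single (a : Int) : pvApairs [a] = [] := by
  simp [pvApairs, PySem.List.slice?, PySem.List.sliceIndices]

theorem pvEvens_cons (a b : Int) (t : List Int) :
    (PySem.List.slice? (a :: b :: t) none none 2).getD []
      = a :: (PySem.List.slice? t none none 2).getD [] := by
  simp only [PySem.List.slice?, PySem.List.sliceIndices]
  norm_num
  have hc : (if (0 : Int) ≤ (t.length : Int) + 1 then (((t.length : Int) + 1 + 1 + 2 - 1) / 2).toNat else 0)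
      = (if 0 < t.length then (((t.length : Int) + 2 - 1) / 2).toNat else 0) + 1 := by
    split_ifs <;> omega
  rw [hc, List.range_succ_eq_map, List.filterMap_cons, List.filterMap_map]
  norm_num
  refine List.filterMap_congr ?_
  intro x _
  have h2 : ((2 : Int) * (x + 1)).toNat = 2 * x + 2 := by omega
  have h3 : ((2 : Int) * (x : Int)).toNat = 2 * x := by omega
  simp [h2, h3]

theorem pvOdds_cons (a b : Int) (t : List Int) :
    (PySem.List.slice? (a :: b :: t) (some 1) none 2).getD []
      = b :: (PySem.List.slice? t (some 1) none 2).getD [] := by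
  simp only [PySem.List.slice?, PySem.List.sliceIndices]
  norm_num
  rcases t with _ | ⟨c, t'⟩
  · norm_num [List.range_succ]
    simp [List.filterMap]
  · have hm1 : min (1 : Int) (((c :: t').length : Int) + 1 + 1) = 1 := by
      have : (0 : Int) ≤ (t'.length : Int) := by positivity
      simp only [List.length_cons]
      push_cast
      omega
    have hm2 : min (1 : Int) (((c :: t').length : Int)) = 1 := by simp
    rw [hm1, hm2]
    have hc : ((((c :: t').length : Int) + 1 + 1 - 1 + 2 - 1) / 2).toNat
        = (if 1 < (c :: t').length then ((((c :: t').length : Int) - 1 + 2 - 1) / 2).toNat else 0) + 1 := by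
      split_ifs <;> omega
    rw [hc, List.range_succ_eq_map, List.filterMap_cons, List.filterMap_map]
    norm_num
    refine List.filterMap_congr ?_
    intro x _
    have h2 : ((1 : Int) + 2 * ((x : Int) + 1)).toNat = 2 * x + 3 := by omega
    have h3 : ((1 : Int) + 2 * (x : Int)).toNat = 2 * x + 1 := by omega
    simp [h2, h3]

theorem pvApairs_cons (a b : Int) (t : List Int) :
    pvApairs (a :: b :: t) = (a, b) :: pvApairs t := by
  simp [pvApairs, pvEvens_cons, pvOdds_cons]

theorem pvTakeLoop_eq (n : Nat) (it : List Char) :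
    pvTakeLoop n it = (it.take n, it.drop n) := by
  induction n generalizing it with
  | zero => simp [pvTakeLoop]
  | succ m ih => cases it <;> simp [pvTakeLoop, ih]

theorem pvSkipLoop_eq (n : Nat) (it : List Char) :
    pvSkipLoop n it = it.drop n := by
  induction n generalizing it with
  | zero => simp [pvSkipLoop]
  | succ m ih => cases it <;> simp [pvSkipLoop, ih]

-- Main loop correspondence: A's fold over the zipped pairs, from running index n,
-- equals B's pair loop on the not-yet-consumed letters (digit entries are ≥ 0).
theorem pvLoop_eq (ns : List Int) (hns : ∀ x ∈ ns, 0 ≤ x) (L : List Char) (n : Nat) (out : List Char) :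
    ((pvApairs ns).foldl
      (fun (st : List Char × Int) ts =>
        (st.1 ++ PySem.List.slice L (some st.2) (some (st.2 + ts.1)),
         st.2 + ts.1 + ts.2))
      (out, (n : Int))).1
    = pvPairLoop ns (L.drop n) out := by
  match ns with
  | [] => simp [pvApairs_nil, pvPairLoop]
  | [a] => simp [pvApairs_single, pvPairLoop]
  | a :: b :: t' =>
    have ha : 0 ≤ a := hns a (by simp)
    have hb : 0 ≤ b := hns b (by simp)
    rw [pvApairs_cons]
    simp only [List.foldl_cons]
    rw [PySem.List.slice_toNat L (by positivity) (by omega)]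
    have h2 : ((n : Int) + a + b) = ((n + a.toNat + b.toNat : Nat) : Int) := by omega
    have h1 : ((n : Int) + a).toNat - ((n : Int)).toNat = a.toNat := by omega
    rw [h1, h2, Int.toNat_natCast,
      pvLoop_eq t' (fun x hx => hns x (by simp [hx])) L _ _]
    rw [pvPairLoop, pvTakeLoop_eq, pvSkipLoop_eq]
    simp [List.drop_drop]

-- ===== VERDICT (by name: the statement is the Claim_ definition above) =====
theorem take_skip_rope_spec : Claim_equal_take_skip_rope := by
  intro message _
  unfold Spec_take_skip_rope take_skip_rope take_skip_rope_alt
  simp only [pvClassify_eq, List.nil_append]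
  have h := pvLoop_eq ((message.toList.filter (fun ch => PySem.Chars.isdigit ch)).map
      (fun ch => ((ch.toNat - 48 : Nat) : Int)))
    (by intro x hx; simp at hx; obtain ⟨c, _, rfl⟩ := hx; positivity)
    (message.toList.filter (fun ch => !(PySem.Chars.isdigit ch))) 0 []
  simp only [List.drop_zero] at h
  simp only [pvApairs] at h
  rw [← h]
  norm_num
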